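-- pv_equiv track=rewrite | github.com/AbhayAjay2803/Vetenary-Project1 | utils/helpers.py | get_symptom_treatments
-- ===== SOURCE A (Python) =====
-- def get_symptom_treatments(symptoms, animal_type):
--     """Get specific treatment considerations based on symptoms and animal type"""
--     treatments = []
--
--     # Gastrointestinal symptoms
--     gi_symptoms = ['vomiting', 'diarrhea', 'loss_of_appetite', 'dehydration', 'bloating', 'constipation']
--     if any(symptom in symptoms for symptom in gi_symptoms):
--         treatments.extend([
--             "Fluid therapy for hydration maintenance",
--             "Dietary management: bland diet or prescription gastrointestinal food",
--             "Antiemetics for vomiting control if indicated",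
--             "Gastroprotectants (e.g., famotidine, omeprazole)",
--             "Probiotics for gut flora restoration"
--         ])
--
--     # Systemic symptoms
--     systemic_symptoms = ['fever', 'lethargy', 'weakness', 'weight_loss']
--     if any(symptom in symptoms for symptom in systemic_symptoms):
--         treatments.extend([
--             "Antipyretics for fever management",
--             "Nutritional support and appetite stimulants if needed",
--             "Comprehensive blood work (CBC, chemistry panel)",
--             "Infectious disease testing as indicated"
--         ])
--
--     # Respiratory symptoms
--     respiratory_symptoms = ['coughing', 'sneezing', 'nasal_discharge', 'rapid_breathing']
--     if any(symptom in symptoms for symptom in respiratory_symptoms):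
--         treatments.extend([
--             "Thoracic radiographs for respiratory assessment",
--             "Bronchodilators if bronchoconstriction present",
--             "Antibiotics for suspected bacterial infection",
--             "Antitussives for cough control when appropriate"
--         ])
--
--     # Neurological symptoms (high priority)
--     neuro_symptoms = ['seizures', 'tremors', 'unconsciousness', 'paralysis']
--     if any(symptom in symptoms for symptom in neuro_symptoms):
--         treatments.extend([
--             "IMMEDIATE NEUROLOGICAL ASSESSMENT REQUIRED",
--             "Anticonvulsant therapy for seizure control",
--             "Advanced imaging (MRI/CT) if indicated",
--             "Neurology consultation recommended"
--         ])
--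
--     # Pain-related symptoms
--     pain_symptoms = ['pain', 'abdominal_pain', 'lameness', 'muscle_pain']
--     if any(symptom in symptoms for symptom in pain_symptoms):
--         treatments.extend([
--             "Multimodal pain management protocol",
--             "NSAIDs appropriate for species (e.g., carprofen, meloxicam)",
--             "Additional analgesics as needed (e.g., gabapentin, tramadol)",
--             "Physical therapy and mobility support"
--         ])
--
--     # Dermatological symptoms
--     derm_symptoms = ['skin_lesions', 'hair_loss', 'skin_rashes', 'itching']
--     if any(symptom in symptoms for symptom in derm_symptoms):
--         treatments.extend([
--             "Dermatological examination and skin scrapings",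
--             "Antipruritic medications for itch relief",
--             "Medicated shampoos and topical therapies",
--             "Allergy testing and management if indicated"
--         ])
--
--     # Species-specific considerations
--     if animal_type.lower() in ['dog', 'cat']:
--         treatments.append("Species-specific medication dosing and monitoring")
--     elif animal_type.lower() in ['rabbit', 'guinea_pig']:
--         treatments.extend([
--             "GI motility agents for herbivore digestive health",
--             "Critical care nutritional support",
--             "Dental examination for malocclusion"
--         ])
--     elif animal_type.lower() in ['bird', 'parrot']:
--         treatments.extend([
--             "Avian-specific diagnostic protocols",
--             "Environmental and nutritional assessment",
--             "Specialized avian veterinary consultation"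
--         ])
--
--     return list(set(treatments))  # Remove duplicates
-- ===== SOURCE B (Python) =====
-- # Symptom-driven rewrite: instead of scanning each fixed symptom group against the
-- # symptom list, classify each input symptom once through an inverse symptom->category
-- # index, then emit each fired category's treatments; species handled by one dict lookup.
--
-- _GROUPS = [
--     ['vomiting', 'diarrhea', 'loss_of_appetite', 'dehydration', 'bloating', 'constipation'],
--     ['fever', 'lethargy', 'weakness', 'weight_loss'],
--     ['coughing', 'sneezing', 'nasal_discharge', 'rapid_breathing'],
--     ['seizures', 'tremors', 'unconsciousness', 'paralysis'],
--     ['pain', 'abdominal_pain', 'lameness', 'muscle_pain'],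
--     ['skin_lesions', 'hair_loss', 'skin_rashes', 'itching'],
-- ]
--
-- _TREATMENTS = [
--     [
--         "Fluid therapy for hydration maintenance",
--         "Dietary management: bland diet or prescription gastrointestinal food",
--         "Antiemetics for vomiting control if indicated",
--         "Gastroprotectants (e.g., famotidine, omeprazole)",
--         "Probiotics for gut flora restoration",
--     ],
--     [
--         "Antipyretics for fever management",
--         "Nutritional support and appetite stimulants if needed",
--         "Comprehensive blood work (CBC, chemistry panel)",
--         "Infectious disease testing as indicated",
--     ],
--     [
--         "Thoracic radiographs for respiratory assessment",
--         "Bronchodilators if bronchoconstriction present",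
--         "Antibiotics for suspected bacterial infection",
--         "Antitussives for cough control when appropriate",
--     ],
--     [
--         "IMMEDIATE NEUROLOGICAL ASSESSMENT REQUIRED",
--         "Anticonvulsant therapy for seizure control",
--         "Advanced imaging (MRI/CT) if indicated",
--         "Neurology consultation recommended",
--     ],
--     [
--         "Multimodal pain management protocol",
--         "NSAIDs appropriate for species (e.g., carprofen, meloxicam)",
--         "Additional analgesics as needed (e.g., gabapentin, tramadol)",
--         "Physical therapy and mobility support",
--     ],
--     [
--         "Dermatological examination and skin scrapings",
--         "Antipruritic medications for itch relief",
--         "Medicated shampoos and topical therapies",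
--         "Allergy testing and management if indicated",
--     ],
-- ]
--
-- _CATEGORY_OF = {s: i for i, group in enumerate(_GROUPS) for s in group}
--
-- _PET = ["Species-specific medication dosing and monitoring"]
-- _HERBIVORE = [
--     "GI motility agents for herbivore digestive health",
--     "Critical care nutritional support",
--     "Dental examination for malocclusion",
-- ]
-- _AVIAN = [
--     "Avian-specific diagnostic protocols",
--     "Environmental and nutritional assessment",
--     "Specialized avian veterinary consultation",
-- ]
--
-- _SPECIES = {
--     'dog': _PET, 'cat': _PET,
--     'rabbit': _HERBIVORE, 'guinea_pig': _HERBIVORE,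
--     'bird': _AVIAN, 'parrot': _AVIAN,
-- }
--
--
-- def get_symptom_treatments(symptoms, animal_type):
--     fired = set()
--     for s in symptoms:
--         c = _CATEGORY_OF.get(s)
--         if c is not None:
--             fired.add(c)
--     treatments = []
--     for i, recs in enumerate(_TREATMENTS):
--         if i in fired:
--             treatments.extend(recs)
--     treatments.extend(_SPECIES.get(animal_type.lower(), []))
--     return list(set(treatments))
-- ===== Notes on version B (the rewrite author's own statement) =====
-- stated objective: faster
-- what changed: Inverts the data flow: instead of six group-vs-list membership scans, B classifies each input symptom once through an inverse symptom-to-category index into a set of fired category ids, then emits treatments per fired category, and replaces the species if/elif chain with one dict lookup.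
import Mathlib
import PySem

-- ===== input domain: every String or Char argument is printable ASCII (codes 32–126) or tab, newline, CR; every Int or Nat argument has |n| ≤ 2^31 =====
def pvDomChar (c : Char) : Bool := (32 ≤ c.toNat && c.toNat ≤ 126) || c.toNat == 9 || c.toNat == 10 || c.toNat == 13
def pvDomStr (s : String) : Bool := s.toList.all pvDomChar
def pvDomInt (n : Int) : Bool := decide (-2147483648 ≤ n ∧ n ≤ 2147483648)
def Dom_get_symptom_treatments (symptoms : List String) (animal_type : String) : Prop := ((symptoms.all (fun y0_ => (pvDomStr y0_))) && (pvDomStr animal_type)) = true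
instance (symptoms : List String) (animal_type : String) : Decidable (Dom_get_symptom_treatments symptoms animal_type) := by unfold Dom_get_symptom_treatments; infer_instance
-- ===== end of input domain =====

-- B inverts A's data flow: it classifies each input symptom once through an inverse
-- symptom→category index into a set of fired category ids, then emits treatments per
-- fired category, and looks the species up in one dict (objective: alternative).
-- 'list(set(...))' is ported as PySem.Set.ofList in both ports.

-- ===== PORT A =====
def get_symptom_treatments (symptoms : List String) (animal_type : String) : List String :=
  let treatments : List String := []
  let gi_symptoms := ["vomiting", "diarrhea", "loss_of_appetite", "dehydration", "bloating", "constipation"]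
  let treatments := if gi_symptoms.any (fun symptom => symptoms.contains symptom) then
      treatments ++ [
        "Fluid therapy for hydration maintenance",
        "Dietary management: bland diet or prescription gastrointestinal food",
        "Antiemetics for vomiting control if indicated",
        "Gastroprotectants (e.g., famotidine, omeprazole)",
        "Probiotics for gut flora restoration"]
    else treatments
  let systemic_symptoms := ["fever", "lethargy", "weakness", "weight_loss"]
  let treatments := if systemic_symptoms.any (fun symptom => symptoms.contains symptom) then
      treatments ++ [
        "Antipyretics for fever management",
        "Nutritional support and appetite stimulants if needed",
        "Comprehensive blood work (CBC, chemistry panel)",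
        "Infectious disease testing as indicated"]
    else treatments
  let respiratory_symptoms := ["coughing", "sneezing", "nasal_discharge", "rapid_breathing"]
  let treatments := if respiratory_symptoms.any (fun symptom => symptoms.contains symptom) then
      treatments ++ [
        "Thoracic radiographs for respiratory assessment",
        "Bronchodilators if bronchoconstriction present",
        "Antibiotics for suspected bacterial infection",
        "Antitussives for cough control when appropriate"]
    else treatments
  let neuro_symptoms := ["seizures", "tremors", "unconsciousness", "paralysis"]
  let treatments := if neuro_symptoms.any (fun symptom => symptoms.contains symptom) then
      treatments ++ [
        "IMMEDIATE NEUROLOGICAL ASSESSMENT REQUIRED",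
        "Anticonvulsant therapy for seizure control",
        "Advanced imaging (MRI/CT) if indicated",
        "Neurology consultation recommended"]
    else treatments
  let pain_symptoms := ["pain", "abdominal_pain", "lameness", "muscle_pain"]
  let treatments := if pain_symptoms.any (fun symptom => symptoms.contains symptom) then
      treatments ++ [
        "Multimodal pain management protocol",
        "NSAIDs appropriate for species (e.g., carprofen, meloxicam)",
        "Additional analgesics as needed (e.g., gabapentin, tramadol)",
        "Physical therapy and mobility support"]
    else treatments
  let derm_symptoms := ["skin_lesions", "hair_loss", "skin_rashes", "itching"]
  let treatments := if derm_symptoms.any (fun symptom => symptoms.contains symptom) then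
      treatments ++ [
        "Dermatological examination and skin scrapings",
        "Antipruritic medications for itch relief",
        "Medicated shampoos and topical therapies",
        "Allergy testing and management if indicated"]
    else treatments
  let treatments :=
    if ["dog", "cat"].contains (PySem.Str.lower animal_type) then
      treatments ++ ["Species-specific medication dosing and monitoring"]
    else if ["rabbit", "guinea_pig"].contains (PySem.Str.lower animal_type) then
      treatments ++ [
        "GI motility agents for herbivore digestive health",
        "Critical care nutritional support",
        "Dental examination for malocclusion"]
    else if ["bird", "parrot"].contains (PySem.Str.lower animal_type) then
      treatments ++ [
        "Avian-specific diagnostic protocols",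
        "Environmental and nutritional assessment",
        "Specialized avian veterinary consultation"]
    else treatments
  PySem.Set.ofList treatments

-- ===== PORT B =====
-- _CATEGORY_OF = {s: i for i, group in enumerate(_GROUPS) for s in group}, the
-- comprehension unrolled to its 26 literal (symptom, category) pairs in order.
def pvCatOf : PySem.Dict String Int := PySem.Dict.ofList [
  ("vomiting", 0), ("diarrhea", 0), ("loss_of_appetite", 0), ("dehydration", 0), ("bloating", 0), ("constipation", 0),
  ("fever", 1), ("lethargy", 1), ("weakness", 1), ("weight_loss", 1),
  ("coughing", 2), ("sneezing", 2), ("nasal_discharge", 2), ("rapid_breathing", 2),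
  ("seizures", 3), ("tremors", 3), ("unconsciousness", 3), ("paralysis", 3),
  ("pain", 4), ("abdominal_pain", 4), ("lameness", 4), ("muscle_pain", 4),
  ("skin_lesions", 5), ("hair_loss", 5), ("skin_rashes", 5), ("itching", 5)]

def pvTreatments : List (List String) := [
  ["Fluid therapy for hydration maintenance",
   "Dietary management: bland diet or prescription gastrointestinal food",
   "Antiemetics for vomiting control if indicated",
   "Gastroprotectants (e.g., famotidine, omeprazole)",
   "Probiotics for gut flora restoration"],
  ["Antipyretics for fever management",
   "Nutritional support and appetite stimulants if needed",
   "Comprehensive blood work (CBC, chemistry panel)",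
   "Infectious disease testing as indicated"],
  ["Thoracic radiographs for respiratory assessment",
   "Bronchodilators if bronchoconstriction present",
   "Antibiotics for suspected bacterial infection",
   "Antitussives for cough control when appropriate"],
  ["IMMEDIATE NEUROLOGICAL ASSESSMENT REQUIRED",
   "Anticonvulsant therapy for seizure control",
   "Advanced imaging (MRI/CT) if indicated",
   "Neurology consultation recommended"],
  ["Multimodal pain management protocol",
   "NSAIDs appropriate for species (e.g., carprofen, meloxicam)",
   "Additional analgesics as needed (e.g., gabapentin, tramadol)",
   "Physical therapy and mobility support"],
  ["Dermatological examination and skin scrapings",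
   "Antipruritic medications for itch relief",
   "Medicated shampoos and topical therapies",
   "Allergy testing and management if indicated"]]

def pvPet : List String := ["Species-specific medication dosing and monitoring"]
def pvHerbivore : List String := [
  "GI motility agents for herbivore digestive health",
  "Critical care nutritional support",
  "Dental examination for malocclusion"]
def pvAvian : List String := [
  "Avian-specific diagnostic protocols",
  "Environmental and nutritional assessment",
  "Specialized avian veterinary consultation"]

def pvSpeciesTable : PySem.Dict String (List String) := PySem.Dict.ofList [
  ("dog", pvPet), ("cat", pvPet),
  ("rabbit", pvHerbivore), ("guinea_pig", pvHerbivore),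
  ("bird", pvAvian), ("parrot", pvAvian)]

-- the classification loop: for s in symptoms: c = _CATEGORY_OF.get(s); if c is not None: fired.add(c)
def pvFired (symptoms : List String) : PySem.Set Int :=
  symptoms.foldl (fun acc s =>
    match PySem.Dict.get? pvCatOf s with
    | some c => PySem.Set.add acc c
    | none => acc) PySem.Set.empty

def get_symptom_treatments_alt (symptoms : List String) (animal_type : String) : List String :=
  let fired := pvFired symptoms
  let treatments : List String := (PySem.List.enumerate pvTreatments).foldl
    (fun acc ir => if PySem.Set.contains fired ir.1 then acc ++ ir.2 else acc) []
  let treatments := treatments ++ PySem.Dict.getD pvSpeciesTable (PySem.Str.lower animal_type) []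
  PySem.Set.ofList treatments

-- ===== PRECONDITION & SPEC =====
def Spec_get_symptom_treatments (symptoms : List String) (animal_type : String) (out : List String) : Prop := out = get_symptom_treatments_alt symptoms animal_type
instance (symptoms : List String) (animal_type : String) (out : List String) : Decidable (Spec_get_symptom_treatments symptoms animal_type out) := by unfold Spec_get_symptom_treatments; infer_instance

-- ===== CLAIM (what is proved, stated in full; the proofs are below) =====
def Claim_equal_get_symptom_treatments : Prop := ∀ (symptoms : List String) (animal_type : String), Dom_get_symptom_treatments symptoms animal_type → Spec_get_symptom_treatments symptoms animal_type (get_symptom_treatments symptoms animal_type)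

-- ===== LEMMAS AND PROOFS =====

-- membership in the fired-category set after the classification fold
theorem pv_mem_fold (symptoms : List String) (acc : PySem.Set Int) (i : Int) :
    i ∈ symptoms.foldl (fun acc s =>
        match PySem.Dict.get? pvCatOf s with
        | some c => PySem.Set.add acc c
        | none => acc) acc ↔
      i ∈ acc ∨ ∃ s ∈ symptoms, PySem.Dict.get? pvCatOf s = some i := by
  induction symptoms generalizing acc with
  | nil => simp
  | cons hd tl ih =>
    cases h : PySem.Dict.get? pvCatOf hd with
    | none =>
      simp only [List.foldl_cons, h, ih, List.mem_cons]
      constructor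
      · rintro (ha | ⟨s, hs, hm⟩)
        · exact Or.inl ha
        · exact Or.inr ⟨s, Or.inr hs, hm⟩
      · rintro (ha | ⟨s, (rfl | hs), hm⟩)
        · exact Or.inl ha
        · rw [h] at hm; cases hm
        · exact Or.inr ⟨s, hs, hm⟩
    | some c =>
      simp only [List.foldl_cons, h, ih, PySem.Set.mem_add, List.mem_cons]
      constructor
      · rintro ((ha | hic) | ⟨s, hs, hm⟩)
        · exact Or.inl ha
        · exact Or.inr ⟨hd, Or.inl rfl, by rw [h, hic]⟩
        · exact Or.inr ⟨s, Or.inr hs, hm⟩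
      · rintro (ha | ⟨s, (rfl | hs), hm⟩)
        · exact Or.inl (Or.inl ha)
        · rw [h] at hm; exact Or.inl (Or.inr (Option.some_injective _ hm).symm)
        · exact Or.inr ⟨s, hs, hm⟩

-- the fired set and A's per-group condition agree for a category i whose group is g
theorem pv_cond (symptoms : List String) (i : Int) (g : List String)
    (hg : ∀ s : String, PySem.Dict.get? pvCatOf s = some i ↔ s ∈ g) :
    PySem.Set.contains (pvFired symptoms) i = g.any (fun t => symptoms.contains t) := by
  rw [Bool.eq_iff_iff, PySem.Set.contains_iff, List.any_eq_true]
  unfold pvFired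
  rw [pv_mem_fold]
  simp only [PySem.Set.empty, List.not_mem_nil, false_or, hg, List.contains_eq_mem,
    decide_eq_true_eq]
  exact ⟨fun ⟨s, h1, h2⟩ => ⟨s, h2, h1⟩, fun ⟨t, h1, h2⟩ => ⟨t, h2, h1⟩⟩

-- first-match lookup in a dict with pairwise-distinct keys is plain membership
theorem pv_get?_eq_some_iff (l : List (String × Int)) (hl : (l.map Prod.fst).Nodup)
    (s : String) (i : Int) :
    (PySem.Dict.mk l).get? s = some i ↔ (s, i) ∈ l := by
  induction l with
  | nil => simp [PySem.Dict.get?]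
  | cons p rest ih =>
    obtain ⟨k, v⟩ := p
    simp only [List.map_cons, List.nodup_cons] at hl
    rw [PySem.Dict.get?_mk_cons]
    by_cases hk : k = s
    · subst hk
      rw [BEq.rfl, if_pos rfl]
      constructor
      · intro h
        injection h with h
        rw [h]
        exact List.mem_cons_self
      · intro hm
        rcases List.mem_cons.mp hm with h | hm
        · rw [Prod.mk.injEq] at h
          rw [h.2]
        · exact absurd (List.mem_map_of_mem hm) hl.1
    · have hne : (k == s) = false := by rw [beq_eq_false_iff_ne]; exact hk
      rw [hne, if_neg (by simp)]
      rw [ih hl.2]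
      constructor
      · exact fun h => List.mem_cons_of_mem _ h
      · intro hm
        rcases List.mem_cons.mp hm with h | hm
        · rw [Prod.mk.injEq] at h
          exact absurd h.1.symm hk
        · exact hm

def pvCatPairs : List (String × Int) := [
  ("vomiting", 0), ("diarrhea", 0), ("loss_of_appetite", 0), ("dehydration", 0), ("bloating", 0), ("constipation", 0),
  ("fever", 1), ("lethargy", 1), ("weakness", 1), ("weight_loss", 1),
  ("coughing", 2), ("sneezing", 2), ("nasal_discharge", 2), ("rapid_breathing", 2),
  ("seizures", 3), ("tremors", 3), ("unconsciousness", 3), ("paralysis", 3),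
  ("pain", 4), ("abdominal_pain", 4), ("lameness", 4), ("muscle_pain", 4),
  ("skin_lesions", 5), ("hair_loss", 5), ("skin_rashes", 5), ("itching", 5)]

theorem pv_catOf_iff (s : String) (i : Int) :
    PySem.Dict.get? pvCatOf s = some i ↔ (s, i) ∈ pvCatPairs := by
  have hmk : pvCatOf = PySem.Dict.mk pvCatPairs := by rfl
  rw [hmk]
  exact pv_get?_eq_some_iff pvCatPairs (by decide) s i

-- characterization of the inverse index, one category at a time
theorem pv_cat0 (s : String) : PySem.Dict.get? pvCatOf s = some 0 ↔
    s ∈ ["vomiting", "diarrhea", "loss_of_appetite", "dehydration", "bloating", "constipation"] := by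
  rw [pv_catOf_iff]; simp [pvCatPairs]

theorem pv_cat1 (s : String) : PySem.Dict.get? pvCatOf s = some 1 ↔
    s ∈ ["fever", "lethargy", "weakness", "weight_loss"] := by
  rw [pv_catOf_iff]; simp [pvCatPairs]

theorem pv_cat2 (s : String) : PySem.Dict.get? pvCatOf s = some 2 ↔
    s ∈ ["coughing", "sneezing", "nasal_discharge", "rapid_breathing"] := by
  rw [pv_catOf_iff]; simp [pvCatPairs]

theorem pv_cat3 (s : String) : PySem.Dict.get? pvCatOf s = some 3 ↔
    s ∈ ["seizures", "tremors", "unconsciousness", "paralysis"] := by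
  rw [pv_catOf_iff]; simp [pvCatPairs]

theorem pv_cat4 (s : String) : PySem.Dict.get? pvCatOf s = some 4 ↔
    s ∈ ["pain", "abdominal_pain", "lameness", "muscle_pain"] := by
  rw [pv_catOf_iff]; simp [pvCatPairs]

theorem pv_cat5 (s : String) : PySem.Dict.get? pvCatOf s = some 5 ↔
    s ∈ ["skin_lesions", "hair_loss", "skin_rashes", "itching"] := by
  rw [pv_catOf_iff]; simp [pvCatPairs]

-- B's single dict lookup equals A's if/elif chain over mutually exclusive species lists.
theorem pv_species_eq (t : String) :
    PySem.Dict.getD pvSpeciesTable t [] =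
      (if ["dog", "cat"].contains t then pvPet
       else if ["rabbit", "guinea_pig"].contains t then pvHerbivore
       else if ["bird", "parrot"].contains t then pvAvian
       else []) := by
  have hmk : pvSpeciesTable = PySem.Dict.mk [("dog", pvPet), ("cat", pvPet),
      ("rabbit", pvHerbivore), ("guinea_pig", pvHerbivore),
      ("bird", pvAvian), ("parrot", pvAvian)] := by rfl
  rw [hmk]
  by_cases h1 : t = "dog"
  · subst h1; decide
  by_cases h2 : t = "cat"
  · subst h2; decide
  by_cases h3 : t = "rabbit"
  · subst h3; decide
  by_cases h4 : t = "guinea_pig"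
  · subst h4; decide
  by_cases h5 : t = "bird"
  · subst h5; decide
  by_cases h6 : t = "parrot"
  · subst h6; decide
  have e1 : ("dog" == t) = false := by rw [beq_eq_false_iff_ne]; exact fun h => h1 h.symm
  have e2 : ("cat" == t) = false := by rw [beq_eq_false_iff_ne]; exact fun h => h2 h.symm
  have e3 : ("rabbit" == t) = false := by rw [beq_eq_false_iff_ne]; exact fun h => h3 h.symm
  have e4 : ("guinea_pig" == t) = false := by rw [beq_eq_false_iff_ne]; exact fun h => h4 h.symm
  have e5 : ("bird" == t) = false := by rw [beq_eq_false_iff_ne]; exact fun h => h5 h.symm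
  have e6 : ("parrot" == t) = false := by rw [beq_eq_false_iff_ne]; exact fun h => h6 h.symm
  have f1 : (t == "dog") = false := by rw [beq_eq_false_iff_ne]; exact h1
  have f2 : (t == "cat") = false := by rw [beq_eq_false_iff_ne]; exact h2
  have f3 : (t == "rabbit") = false := by rw [beq_eq_false_iff_ne]; exact h3
  have f4 : (t == "guinea_pig") = false := by rw [beq_eq_false_iff_ne]; exact h4
  have f5 : (t == "bird") = false := by rw [beq_eq_false_iff_ne]; exact h5
  have f6 : (t == "parrot") = false := by rw [beq_eq_false_iff_ne]; exact h6
  simp [PySem.Dict.getD_eq_get?_getD, PySem.Dict.get?,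
    List.contains, List.elem, e1, e2, e3, e4, e5, e6, f1, f2, f3, f4, f5, f6]

-- Appending one group chosen by an if/elif chain equals the chain appending in each branch.
theorem pv_append_if_chain {α : Type} (c1 c2 c3 : Bool) (T x y z : List α) :
    T ++ (if c1 then x else if c2 then y else if c3 then z else []) =
    (if c1 then T ++ x else if c2 then T ++ y else if c3 then T ++ z else T) := by
  cases c1 <;> cases c2 <;> cases c3 <;> simp

theorem get_symptom_treatments_eq (symptoms : List String) (animal_type : String) :
    get_symptom_treatments symptoms animal_type = get_symptom_treatments_alt symptoms animal_type := by
  unfold get_symptom_treatments get_symptom_treatments_alt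
  simp only [pvTreatments, PySem.List.enumerate_cons, PySem.List.enumerate_nil, Int.reduceAdd, List.foldl,
    pv_cond symptoms 0 _ pv_cat0, pv_cond symptoms 1 _ pv_cat1, pv_cond symptoms 2 _ pv_cat2,
    pv_cond symptoms 3 _ pv_cat3, pv_cond symptoms 4 _ pv_cat4, pv_cond symptoms 5 _ pv_cat5,
    pv_species_eq, pv_append_if_chain, pvPet, pvHerbivore, pvAvian]

-- ===== VERDICT (by name: the statement is the Claim_ definition above) =====
theorem get_symptom_treatments_spec : Claim_equal_get_symptom_treatments := by
  intro symptoms animal_type _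
  exact get_symptom_treatments_eq symptoms animal_type
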